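-- pv_equiv track=rewrite | github.com/aarongertler/euler | 119.py | interesting
-- ===== SOURCE A (Python) =====
-- def digit_sum(n): # Checked Stack Overflow, this method seems to be quickest
--     s = 0
--     while n:
--         s += n % 10
--         n //= 10
--     return s
--
-- def interesting(n):
-- 	s = digit_sum(n)
-- 	if (s % 2) != (n % 2):
-- 		return False
-- 	else:
-- 		while s < n:
-- 			s *= s
-- 			# n = n / s
-- 			# if not isinstance(n, int): # This was much slower than multiplying up
-- 			# 	return False
-- 			if s == n:
-- 				return True
-- 	return False
-- ===== SOURCE B (Python) =====
-- def digit_sum(n): # Checked Stack Overflow, this method seems to be quickest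
--     s = 0
--     while n:
--         s += n % 10
--         n //= 10
--     return s
--
-- def _is_pow2(e):
--     while e % 2 == 0 and e > 1:
--         e //= 2
--     return e == 1
--
-- def interesting(n):
--     # n is interesting iff n = s**(2**k) for some k >= 1, where s = digit_sum(n).
--     # Instead of squaring s upward, factor n as s**e exactly (repeated division),
--     # then check that the exponent e is a power of two >= 2.
--     s = digit_sum(n)
--     if s < 2 or n <= s:
--         return False
--     m, e = n, 0
--     while m % s == 0:
--         m //= s
--         e += 1
--     return m == 1 and e >= 2 and _is_pow2(e)
-- ===== Notes on version B (the rewrite author's own statement) =====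
-- stated objective: alternative
-- what changed: A squares the digit sum upward (s, s^2, s^4, ...) comparing against n after a parity short-circuit; B factors n as s^e by repeated exact division and checks that the exponent e is a power of two >= 2.
import Mathlib
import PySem

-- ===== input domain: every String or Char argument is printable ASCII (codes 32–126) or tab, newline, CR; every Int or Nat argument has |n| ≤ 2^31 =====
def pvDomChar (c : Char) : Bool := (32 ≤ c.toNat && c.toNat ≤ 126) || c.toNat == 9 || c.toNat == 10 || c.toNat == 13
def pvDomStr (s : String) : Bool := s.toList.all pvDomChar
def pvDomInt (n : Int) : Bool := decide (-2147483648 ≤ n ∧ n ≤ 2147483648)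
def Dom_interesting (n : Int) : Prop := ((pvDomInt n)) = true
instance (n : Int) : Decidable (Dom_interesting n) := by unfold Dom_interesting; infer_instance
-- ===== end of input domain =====

-- B factors n as s^e by repeated exact division and tests the exponent for being a power of two >= 2,
-- instead of A's upward squaring of the digit sum; alternative decomposition, same return value on n >= 0.


-- ===== PORT A =====
-- digit_sum's 'while n:' loop, fueled (fuel only makes it total; it never runs out on 0 ≤ n)
def dsLoop : Nat → Int → Int → Int
  | 0, _, s => s
  | f + 1, n, s =>
    if n ≠ 0 then dsLoop f (PySem.Int.floordiv n 10) (s + PySem.Int.mod n 10) else s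

def digit_sum (n : Int) : Int := dsLoop (n.natAbs + 1) n 0

-- A's 'while s < n: s *= s; if s == n: return True' loop, fueled
def loopA : Nat → Int → Int → Bool
  | 0, _, _ => false
  | f + 1, n, s =>
    if s < n then
      (if s * s = n then true else loopA f n (s * s))
    else false

def interesting (n : Int) : Bool :=
  let s := digit_sum n
  if PySem.Int.mod s 2 ≠ PySem.Int.mod n 2 then false
  else loopA (n.natAbs + 1) n s

-- ===== PORT B =====
-- B's 'while m % s == 0: m //= s; e += 1' loop, fueled (fuel never runs out for 2 ≤ s)
def loopB : Nat → Int → Int → Int → Int × Int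
  | 0, m, _, e => (m, e)
  | f + 1, m, s, e =>
    if PySem.Int.mod m s = 0 then loopB f (PySem.Int.floordiv m s) s (e + 1) else (m, e)

-- B's '_is_pow2' halving loop, fueled
def pow2Loop : Nat → Int → Int
  | 0, e => e
  | f + 1, e =>
    if PySem.Int.mod e 2 = 0 ∧ 1 < e then pow2Loop f (PySem.Int.floordiv e 2) else e

def is_pow2 (e : Int) : Bool := decide (pow2Loop (e.natAbs + 1) e = 1)

def interesting_alt (n : Int) : Bool :=
  let s := digit_sum n
  if s < 2 ∨ n ≤ s then false
  else
    let p := loopB (n.natAbs + 1) n s 0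
    decide (p.1 = 1 ∧ 2 ≤ p.2) && is_pow2 p.2

-- ===== PRECONDITION & SPEC =====
-- Pre_: A's digit_sum loops forever on negative n (n //= 10 stalls at -1), so A never returns there.
def Pre_interesting (n : Int) : Prop := 0 ≤ n
instance (n : Int) : Decidable (Pre_interesting n) := by unfold Pre_interesting; infer_instance
def pvWitness_interesting : Int := 81

def Spec_interesting (n : Int) (out : Bool) : Prop := out = interesting_alt n
instance (n : Int) (out : Bool) : Decidable (Spec_interesting n out) := by unfold Spec_interesting; infer_instance

-- ===== CLAIM (what is proved, stated in full; the proofs are below) =====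
def Claim_equal_interesting : Prop := ∀ (n : Int), Dom_interesting n → Pre_interesting n → Spec_interesting n (interesting n)

-- ===== LEMMAS AND PROOFS =====

lemma dsLoop_nonneg (f : Nat) : ∀ (n s : Int), 0 ≤ s → 0 ≤ dsLoop f n s := by
  induction f with
  | zero => intro n s hs; simpa [dsLoop] using hs
  | succ f ih =>
    intro n s hs
    simp only [dsLoop]
    split
    · apply ih
      have h10 : (0:Int) < 10 := by norm_num
      have hmeq : PySem.Int.mod n 10 = n % 10 :=
        PySem.Int.mod_eq_emod_of_pos h10
      have hm : 0 ≤ PySem.Int.mod n 10 := by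
        rw [hmeq]; exact Int.emod_nonneg n (by norm_num)
      omega
    · exact hs

lemma digit_sum_nonneg (n : Int) : 0 ≤ digit_sum n :=
  dsLoop_nonneg _ n 0 le_rfl

lemma loopA_stuck0 (f : Nat) (n : Int) (h : n ≠ 0) : loopA f n 0 = false := by
  induction f with
  | zero => rfl
  | succ f ih => simp [loopA, ih, h.symm]

lemma loopA_stuck1 (f : Nat) (n : Int) (h : n ≠ 1) : loopA f n 1 = false := by
  induction f with
  | zero => rfl
  | succ f ih => simp [loopA, ih, h.symm]

lemma pow_sq_ge (s : Int) (hs : 2 ≤ s) (k : Nat) (hk : 1 ≤ k) : s * s ≤ s ^ (2 ^ k) := by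
  calc s * s = s ^ 2 := (sq s).symm
    _ ≤ s ^ (2 ^ k) := by
        apply pow_le_pow_right₀ (by omega)
        have : 2 ^ 1 ≤ 2 ^ k := Nat.pow_le_pow_right (by norm_num) hk
        simpa using this

lemma loopA_char (f : Nat) (n : Int) :
    ∀ s : Int, 2 ≤ s →
      (loopA f n s = true ↔ ∃ k : Nat, 1 ≤ k ∧ k ≤ f ∧ s ^ (2 ^ k) = n) := by
  induction f with
  | zero =>
    intro s hs
    simp only [loopA]
    constructor
    · intro h; cases h
    · rintro ⟨k, hk1, hk0, -⟩; omega
  | succ f ih =>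
    intro s hs
    simp only [loopA]
    by_cases hsn : s < n
    · by_cases hs2 : s * s = n
      · rw [if_pos hsn, if_pos hs2]
        constructor
        · intro _
          exact ⟨1, le_rfl, by omega, by simpa [pow_succ, pow_zero, one_mul, sq] using hs2⟩
        · intro _; rfl
      · have hss : 2 ≤ s * s := by nlinarith
        rw [if_pos hsn, if_neg hs2, ih (s * s) hss]
        constructor
        · rintro ⟨k, hk1, hkf, hkeq⟩
          refine ⟨k + 1, by omega, by omega, ?_⟩
          rw [← hkeq, ← sq, ← pow_mul]
          ring_nf
        · rintro ⟨k, hk1, hkf, hkeq⟩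
          rcases Nat.exists_eq_add_of_lt (show 1 ≤ k by omega) with _
          match k, hk1 with
          | 1, _ =>
            exfalso; apply hs2
            simpa [pow_succ, pow_zero, one_mul, sq] using hkeq
          | (j + 2), _ =>
            refine ⟨j + 1, by omega, by omega, ?_⟩
            rw [← hkeq, ← sq, ← pow_mul]
            ring_nf
    · rw [if_neg hsn]
      constructor
      · intro h; cases h
      · rintro ⟨k, hk1, -, hkeq⟩
        exfalso
        have h1 : s * s ≤ s ^ (2 ^ k) := pow_sq_ge s hs k hk1
        nlinarith

lemma loopB_char (f : Nat) (s : Int) (hs : 2 ≤ s) :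
    ∀ (m e : Int), 1 ≤ m → m ≤ s ^ f →
      ∃ (j : Nat) (m' : Int),
        loopB f m s e = (m', e + j) ∧ m = s ^ j * m' ∧ 1 ≤ m' ∧ ¬ (s ∣ m') := by
  induction f with
  | zero =>
    intro m e hm hmf
    have : m = 1 := by simpa using le_antisymm (by simpa using hmf) hm
    subst this
    refine ⟨0, 1, by simp [loopB], by simp, le_rfl, ?_⟩
    intro hdvd
    have := Int.le_of_dvd (by norm_num) hdvd
    omega
  | succ f ih =>
    intro m e hm hmf
    have hs0 : (0:Int) < s := by omega
    have hmod : PySem.Int.mod m s = m % s := PySem.Int.mod_eq_emod_of_pos hs0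
    have hfd : PySem.Int.floordiv m s = m / s := PySem.Int.floordiv_eq_ediv_of_pos hs0
    by_cases hd : PySem.Int.mod m s = 0
    · have hdvd : s ∣ m := by
        rw [hmod] at hd; exact Int.dvd_of_emod_eq_zero hd
      obtain ⟨c, hc⟩ := hdvd
      have hc1 : 1 ≤ c := by nlinarith
      have hdivc : m / s = c := by rw [hc]; exact Int.mul_ediv_cancel_left c (by omega)
      have hcf : c ≤ s ^ f := by
        rw [pow_succ'] at hmf
        nlinarith [pow_pos (show (0:Int) < s by omega) f]
      obtain ⟨j, m', hrun, heq, hm'1, hnd⟩ := ih c (e + 1) hc1 hcf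
      refine ⟨j + 1, m', ?_, ?_, hm'1, hnd⟩
      · simp only [loopB, if_pos hd, hfd, hdivc, hrun]
        congr 1
        push_cast; ring
      · rw [hc, heq, pow_succ]; ring
    · refine ⟨0, m, by simp [loopB, hd], by simp, hm, ?_⟩
      intro hdvd
      apply hd
      rw [hmod]
      exact Int.emod_eq_zero_of_dvd hdvd

lemma pow2Loop_char (f : Nat) :
    ∀ e : Int, 1 ≤ e → e ≤ 2 ^ f → (pow2Loop f e = 1 ↔ ∃ k : Nat, e = 2 ^ k) := by
  induction f with
  | zero =>
    intro e he hef
    have : e = 1 := by simpa using le_antisymm (by simpa using hef) he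
    subst this
    constructor
    · intro _; exact ⟨0, by norm_num⟩
    · intro _; rfl
  | succ f ih =>
    intro e he hef
    have hmod : PySem.Int.mod e 2 = e % 2 := PySem.Int.mod_eq_emod_of_pos (by norm_num)
    have hfd : PySem.Int.floordiv e 2 = e / 2 := PySem.Int.floordiv_eq_ediv_of_pos (by norm_num)
    simp only [pow2Loop]
    by_cases hcond : PySem.Int.mod e 2 = 0 ∧ 1 < e
    · obtain ⟨hev, h1⟩ := hcond
      have hdvd : (2:Int) ∣ e := by
        rw [hmod] at hev; exact Int.dvd_of_emod_eq_zero hev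
      obtain ⟨c, hc⟩ := hdvd
      have hdivc : e / 2 = c := by rw [hc]; exact Int.mul_ediv_cancel_left c (by norm_num)
      have hc1 : 1 ≤ c := by omega
      have hcf : c ≤ 2 ^ f := by rw [pow_succ'] at hef; omega
      rw [if_pos ⟨hev, h1⟩, hfd, hdivc, ih c hc1 hcf]
      constructor
      · rintro ⟨k, rfl⟩
        exact ⟨k + 1, by rw [hc, pow_succ]; ring⟩
      · rintro ⟨k, hk⟩
        match k, hk with
        | 0, hk => omega
        | k + 1, hk =>
          refine ⟨k, ?_⟩
          have : (2:Int) * c = 2 * 2 ^ k := by rw [← hc, hk, pow_succ]; ring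
          omega
    · rw [if_neg hcond]
      by_cases h1 : e = 1
      · subst h1
        constructor
        · intro _; exact ⟨0, by norm_num⟩
        · intro _; rfl
      · have h2 : 1 < e := by omega
        have hodd : PySem.Int.mod e 2 ≠ 0 := fun h => hcond ⟨h, h2⟩
        constructor
        · intro h; exact absurd h h1
        · rintro ⟨k, rfl⟩
          exfalso
          match k with
          | 0 => omega
          | k + 1 =>
            apply hodd
            rw [hmod, pow_succ]
            simp [Int.mul_emod_left]

lemma val_unique (s : Int) (hs : 2 ≤ s) (j : Nat) (m' : Int) (hm' : 1 ≤ m')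
    (hnd : ¬ (s ∣ m')) (N : Nat) (heq : s ^ j * m' = s ^ N) : j = N ∧ m' = 1 := by
  have hspow : ∀ t : Nat, (0:Int) < s ^ t := fun t => pow_pos (by omega) t
  rcases Nat.lt_trichotomy j N with h | h | h
  · exfalso
    apply hnd
    have hsplit : s ^ N = s ^ j * s ^ (N - j) := by
      rw [← pow_add]; congr 1; omega
    rw [hsplit] at heq
    have hm'eq : m' = s ^ (N - j) := by
      have := mul_left_cancel₀ (a := s ^ j) (by positivity) heq
      exact this
    have : s ∣ s ^ (N - j) := dvd_pow_self s (by omega)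
    rw [hm'eq]; exact this
  · refine ⟨h, ?_⟩
    subst h
    exact mul_left_cancel₀ (a := s ^ j) (show (s:Int) ^ j ≠ 0 by positivity)
      (by rw [mul_one]; exact heq)
  · exfalso
    have hsplit : s ^ j = s ^ N * s ^ (j - N) := by
      rw [← pow_add]; congr 1; omega
    rw [hsplit, mul_assoc] at heq
    have h1 : s ^ (j - N) * m' = 1 :=
      mul_left_cancel₀ (a := s ^ N) (show (s:Int) ^ N ≠ 0 by positivity)
        (by rw [mul_one]; exact heq)
    have h2 : (2:Int) ≤ s ^ (j - N) := by
      calc (2:Int) ≤ s := hs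
        _ = s ^ 1 := (pow_one s).symm
        _ ≤ s ^ (j - N) := pow_le_pow_right₀ (by omega) (by omega)
    nlinarith

lemma two_pow_ge (s : Int) (hs : 2 ≤ s) (t : Nat) : (2:Int) ^ t ≤ s ^ t :=
  pow_le_pow_left₀ (by norm_num) hs t

lemma k_le_fuel (k : Nat) (n : Int) (h : (2:Int) ^ (2 ^ k) ≤ n) : k ≤ n.natAbs + 1 := by
  have hn0 : 0 < n := lt_of_lt_of_le (by positivity) h
  have hcast : ((n.natAbs : Int)) = n := Int.natAbs_of_nonneg (by omega)
  have h3 : (2:Nat) ^ (2 ^ k) ≤ n.natAbs := by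
    have h2 : ((2:Nat) ^ (2 ^ k) : Int) ≤ (n.natAbs : Int) := by
      rw [hcast]; exact_mod_cast h
    exact_mod_cast h2
  have h4 : k < 2 ^ k := Nat.lt_two_pow_self
  have h5 : 2 ^ k ≤ 2 ^ (2 ^ k) := Nat.pow_le_pow_right (by norm_num) (by omega)
  omega

lemma pow_parity (s : Int) (e : Nat) (he : 1 ≤ e) : s ^ e % 2 = s % 2 := by
  rcases Int.even_or_odd s with hev | hod
  · have : Even (s ^ e) := (Int.even_pow).mpr ⟨hev, by omega⟩
    rw [Int.even_iff.mp this, Int.even_iff.mp hev]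
  · have : Odd (s ^ e) := hod.pow
    rw [Int.odd_iff.mp this, Int.odd_iff.mp hod]

lemma n_le_s_pow_fuel (s n : Int) (hs : 2 ≤ s) (hn : 1 ≤ n) : n ≤ s ^ (n.natAbs + 1) := by
  have h1 : n ≤ 2 ^ (n.natAbs + 1) := by
    have hcast : ((n.natAbs : Int)) = n := Int.natAbs_of_nonneg (by omega)
    have h2 : n.natAbs < 2 ^ (n.natAbs + 1) := by
      calc n.natAbs < 2 ^ n.natAbs := Nat.lt_two_pow_self
        _ ≤ 2 ^ (n.natAbs + 1) := Nat.pow_le_pow_right (by norm_num) (by omega)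
    calc n = (n.natAbs : Int) := hcast.symm
      _ ≤ ((2 ^ (n.natAbs + 1) : Nat) : Int) := by exact_mod_cast h2.le
      _ = 2 ^ (n.natAbs + 1) := by push_cast; ring
  exact le_trans h1 (two_pow_ge s hs _)

-- ===== VERDICT (by name: the statement is the Claim_ definition above) =====
theorem interesting_spec : Claim_equal_interesting := by
  intro n _ hpre
  unfold Spec_interesting interesting interesting_alt
  simp only []
  set s := digit_sum n with hsdef
  have hs0 : 0 ≤ s := digit_sum_nonneg n
  by_cases hguard : s < 2 ∨ n ≤ s
  · -- B is false; show A is false too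
    rw [if_pos hguard]
    by_cases hp : PySem.Int.mod s 2 ≠ PySem.Int.mod n 2
    · rw [if_pos hp]
    · rw [if_neg hp]
      rcases hguard with hs2 | hns
      · -- s = 0 or s = 1
        by_cases hns : n ≤ s
        · show loopA (n.natAbs + 1) n s = false
          simp only [loopA]
          rw [if_neg (by omega)]
        · push_neg at hns
          interval_cases s
          · exact loopA_stuck0 _ n (by omega)
          · exact loopA_stuck1 _ n (by omega)
      · show loopA (n.natAbs + 1) n s = false
        simp only [loopA]
        rw [if_neg (by omega)]
  · push_neg at hguard
    obtain ⟨hs2, hsn⟩ := hguard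
    have hn1 : 1 ≤ n := by omega
    rw [if_neg (show ¬(s < 2 ∨ n ≤ s) by omega)]
    -- characterize B's loop
    obtain ⟨j, m', hrun, heq, hm'1, hnd⟩ :=
      loopB_char (n.natAbs + 1) s hs2 n 0 hn1 (n_le_s_pow_fuel s n hs2 hn1)
    rw [hrun]
    simp only [zero_add]
    have hAchar := loopA_char (n.natAbs + 1) n s hs2
    -- the B-side boolean
    have hBiff : (decide (m' = 1 ∧ 2 ≤ ((j:Int))) && is_pow2 (j:Int)) = true ↔
        (∃ k : Nat, 1 ≤ k ∧ s ^ (2 ^ k) = n) := by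
      constructor
      · intro hB
        rw [Bool.and_eq_true, decide_eq_true_iff] at hB
        obtain ⟨⟨hm'eq, hj2⟩, hp2⟩ := hB
        have hj2' : 2 ≤ j := by exact_mod_cast hj2
        unfold is_pow2 at hp2
        rw [decide_eq_true_iff] at hp2
        have hjpow : ∃ k : Nat, ((j:Int)) = 2 ^ k := by
          refine (pow2Loop_char _ ((j:Int)) (by exact_mod_cast (by omega : 1 ≤ j)) ?_).mp hp2
          have : ((j:Int)).natAbs = j := Int.natAbs_natCast j
          rw [this]
          have : j < 2 ^ (j + 1) := by
            calc j < 2 ^ j := Nat.lt_two_pow_self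
              _ ≤ 2 ^ (j + 1) := Nat.pow_le_pow_right (by norm_num) (by omega)
          exact_mod_cast this.le
        obtain ⟨k, hk⟩ := hjpow
        have hjk : j = 2 ^ k := by exact_mod_cast hk
        have hk1 : 1 ≤ k := by
          rcases Nat.eq_zero_or_pos k with rfl | h
          · omega
          · omega
        refine ⟨k, hk1, ?_⟩
        rw [heq, hm'eq, mul_one, hjk]
      · rintro ⟨k, hk1, hkeq⟩
        obtain ⟨hjeq, hm'eq⟩ := val_unique s hs2 j m' hm'1 hnd (2 ^ k) (by rw [← hkeq] at heq; exact heq.symm)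
        rw [Bool.and_eq_true, decide_eq_true_iff]
        have hk2 : 2 ≤ j := by
          rw [hjeq]
          calc 2 = 2 ^ 1 := by norm_num
            _ ≤ 2 ^ k := Nat.pow_le_pow_right (by norm_num) hk1
        refine ⟨⟨hm'eq, by exact_mod_cast hk2⟩, ?_⟩
        unfold is_pow2
        rw [decide_eq_true_iff]
        refine (pow2Loop_char _ ((j:Int)) (by exact_mod_cast (by omega : 1 ≤ j)) ?_).mpr ⟨k, by exact_mod_cast hjeq⟩
        have hna : ((j:Int)).natAbs = j := Int.natAbs_natCast j
        rw [hna]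
        have : j < 2 ^ (j + 1) := by
          calc j < 2 ^ j := Nat.lt_two_pow_self
            _ ≤ 2 ^ (j + 1) := Nat.pow_le_pow_right (by norm_num) (by omega)
        exact_mod_cast this.le
    by_cases hp : PySem.Int.mod s 2 ≠ PySem.Int.mod n 2
    · rw [if_pos hp]
      -- parity differs: B must be false
      symm
      rw [← Bool.not_eq_true]
      intro hB
      obtain ⟨k, hk1, hkeq⟩ := hBiff.mp hB
      apply hp
      have hm2 : PySem.Int.mod s 2 = s % 2 := PySem.Int.mod_eq_emod_of_pos (by norm_num)
      have hn2 : PySem.Int.mod n 2 = n % 2 := PySem.Int.mod_eq_emod_of_pos (by norm_num)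
      rw [hm2, hn2, ← hkeq]
      exact (pow_parity s (2 ^ k) (Nat.one_le_two_pow)).symm
    · rw [if_neg hp]
      rw [Bool.eq_iff_iff, hAchar, hBiff]
      constructor
      · rintro ⟨k, hk1, -, hkeq⟩; exact ⟨k, hk1, hkeq⟩
      · rintro ⟨k, hk1, hkeq⟩
        refine ⟨k, hk1, ?_, hkeq⟩
        apply k_le_fuel
        rw [← hkeq]
        exact two_pow_ge s hs2 _
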